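-- pv_equiv track=rewrite | github.com/MartinPetkov/DMASK-Visualizer | dmask.py | find_attributes
-- ===== SOURCE A (Python) =====
-- def find_attributes(query):
--     # Given an AST representing a query, return a list of the attributes that appear
--     # in the query (anything that is not a keyword or table name is an attribute)
--
--     # DOES NOT HANDLE SUBQUERIES -- Subqueries would need to be handled recursively
--     query = query[:]
--     # Remove the FROM clause
--     for i in range(len(query)):
--         if query[i][0].lower() == "from":
--             query.pop(i)
--             break
--
--     attributes = remove_keywords(flatten_list(query))
--     return attributes
--
-- def remove_keywords(query):
--     # Goes through a list and removes any keywords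
--     i = 0
--     while i < len(query):
--         if (is_keyword(query[i])):
--             query.pop(i)
--         else:
--             i += 1
--     return query
--
-- def is_keyword(string):
--     punctuation = "~!@#$%^&*()-_=+[]\\|/.,<> \n"
--     # At the moment, this list is nonexhaustive (see
--     # http://www.postgresql.org/docs/9.3/static/sql-keywords-appendix.html
--     # for full list of keywords)
--     KEYWORDS = ["CREATE VIEW", "FROM", "WHERE", "HAVING", "GROUP BY", "SELECT",
--                 "DISTINCT", "UNION", "ORDER BY", "LIMIT", "OFFSET", "OR", "AND",
--                 "ANY", "ALL", "AS", "ASC", "DESC", "AVG", "BOTH", "ALWAYS",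
--                 "BETWEEN", "JOIN", "NATURAL JOIN", ",", "EXCEPT", "EQUALS",
--                 "IN", "MIN", "MAX", "COUNT", "LEFT JOIN", "RIGHT JOIN",
--                 "LEFT INNER JOIN", "LEFT OUTER JOIN", "RIGHT INNER JOIN",
--                 "RIGHT OUTER JOIN", "EXISTS", "*"]
--
--     # If subqueries are handled recursively, then none of the 'from clause' keywords
--     # has to be mentioned
--
--     string = string.upper().strip(punctuation)
--     if not string or string.isnumeric() or string[0] == '"' or string[0] == "'":
--         return True
--     return (string in KEYWORDS)
--
-- def flatten_list(l):
--     # Given a list of string or lists, flatten them into one list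
--     ret_val = []
--     for item in l:
--         if not isinstance(item, list):
--             ret_val.append(item)
--         else:
--             ret_val.extend(flatten_list(item))
--     return ret_val
-- ===== SOURCE B (Python) =====
-- PUNCTUATION = "~!@#$%^&*()-_=+[]\\|/.,<> \n"
--
-- KEYWORDS = frozenset({
--     "CREATE VIEW", "FROM", "WHERE", "HAVING", "GROUP BY", "SELECT",
--     "DISTINCT", "UNION", "ORDER BY", "LIMIT", "OFFSET", "OR", "AND",
--     "ANY", "ALL", "AS", "ASC", "DESC", "AVG", "BOTH", "ALWAYS",
--     "BETWEEN", "JOIN", "NATURAL JOIN", ",", "EXCEPT", "EQUALS",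
--     "IN", "MIN", "MAX", "COUNT", "LEFT JOIN", "RIGHT JOIN",
--     "LEFT INNER JOIN", "LEFT OUTER JOIN", "RIGHT INNER JOIN",
--     "RIGHT OUTER JOIN", "EXISTS", "*"})
--
--
-- def is_keyword(string):
--     token = string.upper().strip(PUNCTUATION)
--     return (not token or token.isnumeric()
--             or token[0] in "\"'" or token in KEYWORDS)
--
--
-- def find_attributes(query):
--     # One fused forward pass: skip the first FROM-headed clause via a flag,
--     # and append surviving (non-keyword) tokens of every other clause directly
--     # to the output accumulator. No copying, no pops, no intermediate lists.
--     attributes = []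
--     from_seen = False
--     for clause in query:
--         if not from_seen and clause[0].lower() == "from":
--             from_seen = True
--             continue
--         for token in clause:
--             if not is_keyword(token):
--                 attributes.append(token)
--     return attributes
-- ===== Notes on version B (the rewrite author's own statement) =====
-- stated objective: simpler
-- what changed: A's three staged passes with in-place pops (index scan popping the first FROM clause out of a copy, recursive flatten, while-loop popping keywords by index) are fused into one forward pass with a seen-FROM flag that appends surviving tokens directly to the output accumulator; is_keyword tests membership in a frozenset instead of a list, and no pop ever shifts a tail.
import Mathlib
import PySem

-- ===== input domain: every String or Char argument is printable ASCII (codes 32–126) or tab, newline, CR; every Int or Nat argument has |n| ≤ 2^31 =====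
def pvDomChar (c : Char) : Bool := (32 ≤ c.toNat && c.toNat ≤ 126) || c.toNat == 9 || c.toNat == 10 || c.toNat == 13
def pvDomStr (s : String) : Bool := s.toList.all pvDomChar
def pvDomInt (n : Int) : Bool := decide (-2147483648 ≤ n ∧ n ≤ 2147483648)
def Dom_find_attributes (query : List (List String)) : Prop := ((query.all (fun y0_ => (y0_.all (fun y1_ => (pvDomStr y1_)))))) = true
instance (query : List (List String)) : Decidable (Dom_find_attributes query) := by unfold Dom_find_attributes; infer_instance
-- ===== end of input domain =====

-- B fuses A's three staged passes with in-place pops (index scan popping the first FROM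
-- clause, recursive flatten, while-loop popping keywords) into one forward pass with a
-- seen-FROM flag that appends surviving tokens straight to the output; simpler.
-- (The given signature fixes queries to one level of nesting — a list of token lists —
-- so A's recursive flatten_list concatenates exactly the clauses here.)

-- ===== PORT A =====
def pvKeywords : List String :=
  ["CREATE VIEW", "FROM", "WHERE", "HAVING", "GROUP BY", "SELECT",
   "DISTINCT", "UNION", "ORDER BY", "LIMIT", "OFFSET", "OR", "AND",
   "ANY", "ALL", "AS", "ASC", "DESC", "AVG", "BOTH", "ALWAYS",
   "BETWEEN", "JOIN", "NATURAL JOIN", ",", "EXCEPT", "EQUALS",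
   "IN", "MIN", "MAX", "COUNT", "LEFT JOIN", "RIGHT JOIN",
   "LEFT INNER JOIN", "LEFT OUTER JOIN", "RIGHT INNER JOIN",
   "RIGHT OUTER JOIN", "EXISTS", "*"]

def pvPunct : String := "~!@#$%^&*()-_=+[]\\|/.,<> \n"

-- A's is_keyword, step for step; str.isnumeric = Str.strIsdigit on the ASCII domain
def pvIsKeyword (s : String) : Bool :=
  let t := PySem.Str.stripChars (PySem.Str.upper s) pvPunct
  if t = "" || PySem.Str.strIsdigit t
     || (PySem.Str.pyGet? t 0).getD ' ' == '"'
     || (PySem.Str.pyGet? t 0).getD ' ' == '\'' then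
    true
  else
    pvKeywords.contains t

-- query[i][0].lower() == "from"; pyGet? is none on an empty clause (Python raises there — excluded by Pre_)
def pvHeadIsFrom (clause : List String) : Bool :=
  PySem.Str.lower ((PySem.List.pyGet? clause 0).getD "") == "from"

-- A's 'for i in range(len(query)): if …: query.pop(i); break'
def pvRemoveFromGo (q : List (List String)) (i : Nat) : List (List String) :=
  if h : i < q.length then
    if pvHeadIsFrom q[i] then q.eraseIdx i
    else pvRemoveFromGo q (i + 1)
  else q
termination_by q.length - i

-- A's flatten_list: every item is a String (not a list) at this signature, appended one by one
def pvFlatten (l : List (List String)) : List String :=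
  l.foldl (fun acc item => acc ++ item) []

-- A's remove_keywords: while-loop with index i, pop(i) on keywords
def pvRemoveKeywordsGo (q : List String) (i : Nat) : List String :=
  if h : i < q.length then
    if pvIsKeyword q[i] then pvRemoveKeywordsGo (q.eraseIdx i) i
    else pvRemoveKeywordsGo q (i + 1)
  else q
termination_by q.length - i
decreasing_by
  · simp [List.length_eraseIdx, h]; omega
  · omega

def find_attributes (query : List (List String)) : List String :=
  pvRemoveKeywordsGo (pvFlatten (pvRemoveFromGo query 0)) 0

-- ===== PORT B =====
def altPunct : String := "~!@#$%^&*()-_=+[]\\|/.,<> \n"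

-- B's KEYWORDS is a frozenset
def altKeywords : PySem.Set String :=
  PySem.Set.ofList
    ["CREATE VIEW", "FROM", "WHERE", "HAVING", "GROUP BY", "SELECT",
     "DISTINCT", "UNION", "ORDER BY", "LIMIT", "OFFSET", "OR", "AND",
     "ANY", "ALL", "AS", "ASC", "DESC", "AVG", "BOTH", "ALWAYS",
     "BETWEEN", "JOIN", "NATURAL JOIN", ",", "EXCEPT", "EQUALS",
     "IN", "MIN", "MAX", "COUNT", "LEFT JOIN", "RIGHT JOIN",
     "LEFT INNER JOIN", "LEFT OUTER JOIN", "RIGHT INNER JOIN",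
     "RIGHT OUTER JOIN", "EXISTS", "*"]

-- B's is_keyword: one boolean expression; token[0] in "\"'" is first-char membership
def altIsKeyword (s : String) : Bool :=
  let token := PySem.Str.stripChars (PySem.Str.upper s) altPunct
  PySem.Str.len token == 0 || PySem.Str.strIsdigit token
    || ("\"'" : String).toList.contains ((PySem.Str.pyGet? token 0).getD ' ')
    || PySem.Set.contains altKeywords token

-- inner 'for token in clause: if not is_keyword(token): attributes.append(token)'
def altCollect (toks : List String) (acc : List String) : List String :=
  match toks with
  | [] => acc
  | t :: rest => altCollect rest (if altIsKeyword t then acc else acc ++ [t])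

-- outer loop with the from_seen flag
def altWalk (clauses : List (List String)) (fromSeen : Bool) (acc : List String) : List String :=
  match clauses with
  | [] => acc
  | c :: rest =>
    if !fromSeen && (PySem.Str.lower ((PySem.List.pyGet? c 0).getD "") == "from")
    then altWalk rest true acc
    else altWalk rest fromSeen (altCollect c acc)

def find_attributes_alt (query : List (List String)) : List String :=
  altWalk query false []

-- ===== PRECONDITION & SPEC =====
-- Pre_ excludes exactly the queries with an empty top-level clause before the first
-- FROM-headed clause (or anywhere, when no clause is FROM-headed): on those, both A's
-- FROM-scan and B's pass evaluate clause[0] of an empty clause and raise IndexError,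
-- so neither program returns a value there.
def Pre_find_attributes (query : List (List String)) : Prop :=
  ([] : List String) ∉ query.takeWhile (fun c => !pvHeadIsFrom c)
instance (query : List (List String)) : Decidable (Pre_find_attributes query) := by
  unfold Pre_find_attributes; infer_instance

def pvWitness_find_attributes : List (List String) :=
  [["SELECT", "name", ",", "age"], ["FROM", "people"], ["WHERE", "age", "=", "30"]]

def Spec_find_attributes (query : List (List String)) (out : List String) : Prop := out = find_attributes_alt query
instance (query : List (List String)) (out : List String) : Decidable (Spec_find_attributes query out) := by unfold Spec_find_attributes; infer_instance

-- ===== CLAIM (what is proved, stated in full; the proofs are below) =====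
def Claim_equal_find_attributes : Prop := ∀ (query : List (List String)), Dom_find_attributes query → Pre_find_attributes query → Spec_find_attributes query (find_attributes query)

-- ===== LEMMAS AND PROOFS =====

-- proof-side helper: the clauses that survive A's FROM-removal, structurally
def auxRest (cs : List (List String)) (removed : Bool) : List (List String) :=
  match cs with
  | [] => []
  | c :: rest =>
    if !removed && pvHeadIsFrom c then auxRest rest true
    else c :: auxRest rest removed

theorem auxRest_true (cs : List (List String)) : auxRest cs true = cs := by
  induction cs with
  | nil => rfl
  | cons c rest ih => simp [auxRest, ih]

theorem pvRemoveFromGo_eq (q : List (List String)) (i : Nat) :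
    pvRemoveFromGo q i = q.take i ++ auxRest (q.drop i) false := by
  induction i using pvRemoveFromGo.induct (q := q) with
  | case1 i h hfrom =>
    rw [pvRemoveFromGo]
    simp only [h, dite_true, hfrom, if_pos]
    rw [List.eraseIdx_eq_take_drop_succ, List.drop_eq_getElem_cons h]
    simp [auxRest, hfrom, auxRest_true]
  | case2 i h hfrom ih =>
    rw [pvRemoveFromGo]
    simp only [h, dite_true]
    rw [if_neg hfrom, ih]
    conv_rhs => rw [List.drop_eq_getElem_cons h]
    have hstep : auxRest (q[i] :: List.drop (i + 1) q) false
        = q[i] :: auxRest (List.drop (i + 1) q) false := by simp [auxRest, hfrom]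
    rw [hstep, List.take_succ_eq_append_getElem h, List.append_assoc, List.singleton_append]
  | case3 i h =>
    rw [pvRemoveFromGo]
    simp only [h, dite_false]
    rw [List.take_of_length_le (by omega), List.drop_eq_nil_of_le (by omega)]
    simp [auxRest]

theorem pvRemoveKeywordsGo_eq (q : List String) (i : Nat) :
    pvRemoveKeywordsGo q i = q.take i ++ (q.drop i).filter (fun s => !pvIsKeyword s) := by
  induction q, i using pvRemoveKeywordsGo.induct with
  | case1 q i h hkw ih =>
    have hl : (List.take i q).length = i := by simp; omega
    rw [pvRemoveKeywordsGo]
    simp only [h, dite_true, hkw, if_pos]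
    rw [ih, List.eraseIdx_eq_take_drop_succ, List.take_left' hl, List.drop_left' hl]
    rw [List.drop_eq_getElem_cons h, List.filter_cons]
    simp [hkw]
  | case2 q i h hkw ih =>
    rw [pvRemoveKeywordsGo]
    simp only [h, dite_true]
    rw [if_neg hkw, ih]
    conv_rhs => rw [List.drop_eq_getElem_cons h]
    rw [List.filter_cons_of_pos (by simp [hkw])]
    rw [List.take_succ_eq_append_getElem h, List.append_assoc, List.singleton_append]
  | case3 q i h =>
    rw [pvRemoveKeywordsGo]
    simp only [h, dite_false]
    rw [List.take_of_length_le (by omega), List.drop_eq_nil_of_le (by omega)]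
    simp

theorem pvFlatten_go (l : List (List String)) (acc : List String) :
    List.foldl (fun acc item => acc ++ item) acc l = acc ++ l.flatten := by
  induction l generalizing acc with
  | nil => simp
  | cons c rest ih => simp [List.foldl_cons, ih]

theorem pvFlatten_eq (l : List (List String)) : pvFlatten l = l.flatten := by
  unfold pvFlatten
  rw [pvFlatten_go]
  simp

set_option maxRecDepth 8192 in
theorem pvKeywords_nodup : pvKeywords.Nodup := by decide

theorem altKeywords_eq : altKeywords = PySem.Set.ofList pvKeywords := rfl

-- core of is_keyword: B's one boolean expression equals A's if/else, token by token
set_option maxRecDepth 4096 in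
theorem keycore (t : String) :
    (PySem.Str.len t == 0 || PySem.Str.strIsdigit t
      || ("\"'" : String).toList.contains ((PySem.Str.pyGet? t 0).getD ' ')
      || PySem.Set.contains altKeywords t)
    = (if t = "" || PySem.Str.strIsdigit t
          || (PySem.Str.pyGet? t 0).getD ' ' == '"'
          || (PySem.Str.pyGet? t 0).getD ' ' == '\'' then true
       else pvKeywords.contains t) := by
  rw [altKeywords_eq, PySem.Set.contains_eq_listContains,
      PySem.Set.ofList_eq_self_of_nodup _ pvKeywords_nodup]
  by_cases h0 : t = ""
  · subst h0; decide
  · have hlen : ((t.length : Int) == 0) = false := by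
      simp only [beq_eq_false_iff_ne, ne_eq, Nat.cast_eq_zero]
      exact fun hc => h0 (String.length_eq_zero_iff.mp hc)
    by_cases hq1 : (PySem.Str.pyGet? t 0).getD ' ' = '"' <;>
      by_cases hq2 : (PySem.Str.pyGet? t 0).getD ' ' = '\'' <;>
      cases hd : PySem.Str.strIsdigit t <;>
      simp [hlen, h0, hq1, hq2, hd, List.contains_eq_mem]

theorem altIsKeyword_eq (s : String) : altIsKeyword s = pvIsKeyword s := by
  unfold altIsKeyword pvIsKeyword
  rw [show altPunct = pvPunct from rfl]
  exact keycore _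

theorem altCollect_eq (toks acc : List String) :
    altCollect toks acc = acc ++ toks.filter (fun t => !pvIsKeyword t) := by
  induction toks generalizing acc with
  | nil => simp [altCollect]
  | cons t rest ih =>
    rw [altCollect, ih, List.filter_cons]
    by_cases hk : pvIsKeyword t = true <;> simp [altIsKeyword_eq, hk]

theorem altWalk_true (cs : List (List String)) (acc : List String) :
    altWalk cs true acc = acc ++ cs.flatten.filter (fun t => !pvIsKeyword t) := by
  induction cs generalizing acc with
  | nil => simp [altWalk]
  | cons c rest ih =>
    rw [altWalk, if_neg (by simp), altCollect_eq, ih]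
    simp [List.flatten_cons, List.filter_append, List.append_assoc]

theorem altWalk_false (cs : List (List String)) (acc : List String) :
    altWalk cs false acc = acc ++ (auxRest cs false).flatten.filter (fun t => !pvIsKeyword t) := by
  induction cs generalizing acc with
  | nil => simp [altWalk, auxRest]
  | cons c rest ih =>
    by_cases hfrom : pvHeadIsFrom c = true
    · rw [altWalk, if_pos (by simp only [Bool.not_false, Bool.true_and]; exact hfrom), altWalk_true]
      simp [auxRest, hfrom, auxRest_true]
    · rw [altWalk,
          if_neg (by simp only [Bool.not_false, Bool.true_and]; exact fun hc => hfrom hc),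
          altCollect_eq, ih]
      simp [auxRest, hfrom, List.flatten_cons, List.filter_append, List.append_assoc]

-- ===== VERDICT (by name: the statement is the Claim_ definition above) =====
theorem find_attributes_spec : Claim_equal_find_attributes := by
  intro query _ _
  unfold Spec_find_attributes find_attributes find_attributes_alt
  rw [pvRemoveKeywordsGo_eq, pvFlatten_eq, pvRemoveFromGo_eq, altWalk_false]
  simp
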